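-- pv_equiv track=rewrite | github.com/CynyuS/compilers | tracer/trace.py | find_pred
-- ===== SOURCE A (Python) =====
-- def find_pred(b_idx, preds, dom):
--     pred_list = preds.get(b_idx, [])
--     if not pred_list:
--         return set()
--     result = dom[pred_list[0]].copy() #set intersection of preds like stated in lecture
--     for p in pred_list[1:]:
--         result = result & dom[p]
--     return result
-- ===== SOURCE B (Python) =====
-- def find_pred(b_idx, preds, dom):
--     pred_list = preds.get(b_idx, [])
--     if not pred_list:
--         return set()
--     # One counting pass: tally, for every element, in how many predecessors'
--     # dominator sets it occurs; an element dominates all preds iff its tally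
--     # equals len(pred_list).
--     cnt = {}
--     for p in pred_list:
--         for x in dom[p]:
--             cnt[x] = cnt.get(x, 0) + 1
--     k = len(pred_list)
--     return {x for x in dom[pred_list[0]] if cnt[x] == k}
-- ===== Notes on version B (the rewrite author's own statement) =====
-- stated objective: alternative
-- what changed: Replaces the fold of pairwise set intersections with a counting pass: a dict tallies in how many predecessors' dominator sets each element occurs, and the result keeps exactly the elements whose tally equals the number of predecessors, so no intermediate intersection sets and no per-element membership scans are built.
import Mathlib
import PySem

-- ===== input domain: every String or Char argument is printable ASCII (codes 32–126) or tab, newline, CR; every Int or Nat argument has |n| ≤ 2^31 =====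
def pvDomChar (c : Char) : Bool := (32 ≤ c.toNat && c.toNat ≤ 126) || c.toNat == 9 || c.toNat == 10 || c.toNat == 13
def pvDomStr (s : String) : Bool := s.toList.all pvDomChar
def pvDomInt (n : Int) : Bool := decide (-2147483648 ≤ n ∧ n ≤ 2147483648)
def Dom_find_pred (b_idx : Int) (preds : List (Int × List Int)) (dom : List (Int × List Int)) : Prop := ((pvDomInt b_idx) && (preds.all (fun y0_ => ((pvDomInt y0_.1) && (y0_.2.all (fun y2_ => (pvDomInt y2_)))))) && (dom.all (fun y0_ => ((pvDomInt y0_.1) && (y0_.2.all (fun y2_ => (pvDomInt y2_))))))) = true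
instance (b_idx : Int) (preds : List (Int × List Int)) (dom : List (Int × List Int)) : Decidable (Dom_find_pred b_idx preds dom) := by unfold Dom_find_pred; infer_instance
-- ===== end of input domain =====

-- B replaces A's fold of pairwise set intersections with one counting pass (a tally dict) plus a final filter by tally = number of predecessors (alternative algorithm, same cost).

-- ===== PORT A =====
def find_pred (b_idx : Int) (preds : List (Int × List Int)) (dom : List (Int × List Int)) : List Int :=
  let pred_list := PySem.Dict.getD ⟨preds⟩ b_idx []
  if pred_list = [] then []
  else
    -- dom[pred_list[0]].copy(); Pre_ guarantees every predecessor is a key of dom (else Python raises KeyError)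
    let result := PySem.Dict.getD ⟨dom⟩ (pred_list.headD 0) []
    -- for p in pred_list[1:]: result = result & dom[p]   (set intersection, list-as-set)
    pred_list.tail.foldl (fun r p => r.filter (fun x => (PySem.Dict.getD ⟨dom⟩ p []).contains x)) result

-- ===== PORT B =====
def find_pred_alt (b_idx : Int) (preds : List (Int × List Int)) (dom : List (Int × List Int)) : List Int :=
  let pred_list := PySem.Dict.getD ⟨preds⟩ b_idx []
  match pred_list with
  | [] => []
  | first :: rest =>
    -- cnt = {}; for p in pred_list: for x in dom[p]: cnt[x] = cnt.get(x, 0) + 1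
    let cnt : PySem.Dict Int Int :=
      (first :: rest).foldl
        (fun c p => (PySem.Dict.getD ⟨dom⟩ p []).foldl
          (fun c x => PySem.Dict.insert c x (PySem.Dict.getD c x 0 + 1)) c)
        PySem.Dict.empty
    let k : Int := (first :: rest).length
    -- {x for x in dom[pred_list[0]] if cnt[x] == k}
    (PySem.Dict.getD ⟨dom⟩ first []).filter (fun x => PySem.Dict.getD cnt x 0 == k)

-- ===== PRECONDITION & SPEC =====
-- Pre_ excludes (a) inputs where Python A raises KeyError (a predecessor of b_idx missing from dom)
-- and (b) dom values with duplicate elements: dom's values are Python SETS, so a duplicate-bearing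
-- list in that position represents no Python input under the type convention.
def Pre_find_pred (b_idx : Int) (preds : List (Int × List Int)) (dom : List (Int × List Int)) : Prop :=
  (∀ p ∈ PySem.Dict.getD ⟨preds⟩ b_idx [], 1 ≤ (dom.map Prod.fst).count p) ∧
  (∀ kv ∈ dom, kv.2.Nodup)
instance (b_idx : Int) (preds : List (Int × List Int)) (dom : List (Int × List Int)) : Decidable (Pre_find_pred b_idx preds dom) := by unfold Pre_find_pred; infer_instance
def pvWitness_find_pred : Int × (List (Int × List Int)) × (List (Int × List Int)) :=
  (1, [(1, [2, 3])], [(2, [4, 5]), (3, [5, 6])])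
def Spec_find_pred (b_idx : Int) (preds : List (Int × List Int)) (dom : List (Int × List Int)) (out : List Int) : Prop := out = find_pred_alt b_idx preds dom
instance (b_idx : Int) (preds : List (Int × List Int)) (dom : List (Int × List Int)) (out : List Int) : Decidable (Spec_find_pred b_idx preds dom out) := by unfold Spec_find_pred; infer_instance

-- ===== CLAIM (what is proved, stated in full; the proofs are below) =====
def Claim_equal_find_pred : Prop := ∀ (b_idx : Int) (preds : List (Int × List Int)) (dom : List (Int × List Int)), Dom_find_pred b_idx preds dom → Pre_find_pred b_idx preds dom → Spec_find_pred b_idx preds dom (find_pred b_idx preds dom)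

-- ===== LEMMAS AND PROOFS =====

-- A's fold of filters equals one filter by the conjunction of the tests.
theorem foldl_filter_eq_filter_all {α β : Type} (g : β → α → Bool) :
    ∀ (rest : List β) (init : List α),
      rest.foldl (fun r p => r.filter (g p)) init
        = init.filter (fun x => rest.all (fun p => g p x)) := by
  intro rest
  induction rest with
  | nil => intro init; simp
  | cons p rest ih =>
    intro init
    simp only [List.foldl_cons, ih, List.filter_filter, List.all_cons]
    simp [Bool.and_comm]

-- B's nested counting loop: the tally of x is the summed multiplicity of x over the lists dval p.
theorem getD_count_loop (dval : Int → List Int) :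
    ∀ (pl : List Int) (c : PySem.Dict Int Int) (x : Int),
      PySem.Dict.getD
        (pl.foldl (fun c p => (dval p).foldl
            (fun c x => PySem.Dict.insert c x (PySem.Dict.getD c x 0 + 1)) c) c) x 0
        = PySem.Dict.getD c x 0 + (pl.map (fun p => ((dval p).count x : Int))).sum := by
  intro pl
  induction pl with
  | nil => intro c x; simp
  | cons p pl ih =>
    intro c x
    simp only [List.foldl_cons, ih, List.map_cons, List.sum_cons,
      PySem.Dict.getD_foldl_insert_add_one]
    ring

-- With every dval p duplicate-free, the tally equals the length iff x lies in every dval p.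
theorem sum_count_eq_length_iff (dval : Int → List Int)
    (hnd : ∀ p : Int, (dval p).Nodup) (x : Int) :
    ∀ pl : List Int,
      ((pl.map (fun p => ((dval p).count x : Int))).sum = (pl.length : Int))
        ↔ ∀ p ∈ pl, x ∈ dval p := by
  intro pl
  induction pl with
  | nil => simp
  | cons p pl ih =>
    have h1 : (dval p).count x ≤ 1 := List.nodup_iff_count_le_one.mp (hnd p) x
    have hs : ∀ ql : List Int, (ql.map (fun q => ((dval q).count x : Int))).sum ≤ (ql.length : Int) := by
      intro ql
      induction ql with
      | nil => simp
      | cons q ql ihq =>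
        have := List.nodup_iff_count_le_one.mp (hnd q) x
        simp only [List.map_cons, List.sum_cons, List.length_cons]
        push_cast
        omega
    have hs' := hs pl
    constructor
    · intro h
      simp only [List.map_cons, List.sum_cons, List.length_cons] at h
      have hcount : ((dval p).count x : Int) = 1 ∧
          (pl.map (fun q => ((dval q).count x : Int))).sum = (pl.length : Int) := by
        constructor <;> [skip; skip] <;>
        · push_cast at h ⊢; omega
      intro q hq
      rcases List.mem_cons.mp hq with hq | hq
      · subst hq
        have : 1 ≤ (dval q).count x := by
          have := hcount.1; omega
        exact List.one_le_count_iff.mp this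
      · exact (ih.mp hcount.2) q hq
    · intro h
      have hp : (dval p).count x = 1 := by
        have h1' : 1 ≤ (dval p).count x := List.one_le_count_iff.mpr (h p (by simp))
        omega
      have hrest := ih.mpr (fun q hq => h q (List.mem_cons_of_mem _ hq))
      simp only [List.map_cons, List.sum_cons, List.length_cons, hp, hrest]
      push_cast
      ring

-- getD over an assoc list with a present key yields a member value satisfying any property of dom's rows.
theorem getD_dict_nodup (dom : List (Int × List Int))
    (hnd : ∀ kv ∈ dom, kv.2.Nodup) (p : Int) :
    (PySem.Dict.getD ⟨dom⟩ p []).Nodup := by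
  induction dom with
  | nil => simp [PySem.Dict.getD, PySem.Dict.get?]
  | cons kv rest ih =>
    by_cases h : p = kv.1
    · have : PySem.Dict.getD ⟨kv :: rest⟩ p [] = kv.2 := by
        simp [PySem.Dict.getD, PySem.Dict.get?, h]
      rw [this]; exact hnd kv (by simp)
    · have hb : (kv.1 == p) = false := beq_eq_false_iff_ne.mpr (fun hh => h hh.symm)
      have : PySem.Dict.getD ⟨kv :: rest⟩ p [] = PySem.Dict.getD ⟨rest⟩ p [] := by
        simp [PySem.Dict.getD, PySem.Dict.get?, hb]
      rw [this]; exact ih (fun kv hkv => hnd kv (List.mem_cons_of_mem _ hkv))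

-- ===== VERDICT (by name: the statement is the Claim_ definition above) =====
theorem find_pred_spec : Claim_equal_find_pred := by
  intro b_idx preds dom _ hpre
  show find_pred b_idx preds dom = find_pred_alt b_idx preds dom
  unfold find_pred find_pred_alt
  cases hpl : PySem.Dict.getD ⟨preds⟩ b_idx [] with
  | nil => rfl
  | cons first rest =>
    simp only [List.tail_cons, List.headD_cons,
      if_neg (List.cons_ne_nil first rest)]
    rw [foldl_filter_eq_filter_all]
    apply List.filter_congr
    intro x hx
    have hnodup : ∀ p : Int, (PySem.Dict.getD ⟨dom⟩ p []).Nodup :=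
      getD_dict_nodup dom hpre.2
    rw [getD_count_loop (fun p => PySem.Dict.getD ⟨dom⟩ p [])]
    simp only [PySem.Dict.getD_empty, zero_add]
    have hiff := sum_count_eq_length_iff (fun p => PySem.Dict.getD ⟨dom⟩ p []) hnodup x (first :: rest)
    rw [Bool.eq_iff_iff]
    simp only [List.all_eq_true, List.contains_iff_mem, beq_iff_eq]
    constructor
    · intro hall
      exact hiff.mpr (by
        intro p hp
        rcases List.mem_cons.mp hp with hp | hp
        · subst hp; exact hx
        · exact hall p hp)
    · intro hsum p hp
      exact hiff.mp hsum p (List.mem_cons_of_mem _ hp)
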